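-- pv_equiv track=rewrite | github.com/sunhaozhepy/hex_edinburgh | solver.py | move_southeast
-- ===== SOURCE A (Python) =====
-- BOARD_SIZE = 9
--
-- def move_southeast(shapes):
--     for shape in shapes:
--         for i in range(len(shape)):
--             x, y = shape[i]
--             q, r = offset_to_axial(x, y)
--             r += 1
--             shape[i] = axial_to_offset(q, r)
--     return shapes
--
-- def offset_to_axial(x, y):
--     if x <= BOARD_SIZE // 2:
--         q = y - x
--     else:
--         q = y - BOARD_SIZE // 2
--     r = x - BOARD_SIZE // 2
--     return q, r
--
-- def axial_to_offset(q, r):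
--     x = r + BOARD_SIZE // 2
--     if x <= BOARD_SIZE // 2:
--         y = q + r + BOARD_SIZE // 2
--     else:
--         y = q + BOARD_SIZE // 2
--     return x, y
-- ===== SOURCE B (Python) =====
-- def move_southeast(shapes):
--     # Fused closed-form shift: same in-place mutation as A, same return value.
--     for shape in shapes:
--         shape[:] = [(x + 1, y + 1 if x <= 3 else y) for x, y in shape]
--     return shapes
-- ===== Notes on version B (the rewrite author's own statement) =====
-- stated objective: simpler
-- what changed: Replaces the offset_to_axial / r+=1 / axial_to_offset roundtrip and the index loop with one fused closed-form per-point formula (x+1, y+1 if x<=3 else y) applied by a comprehension; both helpers and the intermediate axial coordinates disappear.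
import Mathlib
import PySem

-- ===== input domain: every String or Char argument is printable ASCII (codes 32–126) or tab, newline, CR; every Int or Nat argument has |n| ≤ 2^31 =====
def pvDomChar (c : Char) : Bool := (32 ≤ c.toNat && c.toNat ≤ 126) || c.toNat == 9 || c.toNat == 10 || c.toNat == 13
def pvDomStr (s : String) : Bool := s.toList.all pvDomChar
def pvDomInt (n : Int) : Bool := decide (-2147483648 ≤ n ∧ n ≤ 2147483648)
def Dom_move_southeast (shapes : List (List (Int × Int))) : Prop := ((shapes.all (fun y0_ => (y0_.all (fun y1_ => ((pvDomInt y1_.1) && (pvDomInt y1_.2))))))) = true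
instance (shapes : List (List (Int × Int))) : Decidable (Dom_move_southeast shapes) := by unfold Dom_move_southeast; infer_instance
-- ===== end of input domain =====

-- B fuses A's axial roundtrip into one closed-form per-point shift (objective: simpler).
-- Note: the Python A mutates its argument in place; the equivalence proved here is about the return value.

-- ===== PORT A =====
-- BOARD_SIZE = 9, BOARD_SIZE // 2 = 4
def offset_to_axial (x y : Int) : Int × Int :=
  let q := if x ≤ 4 then y - x else y - 4
  (q, x - 4)

def axial_to_offset (q r : Int) : Int × Int :=
  let x := r + 4
  let y := if x ≤ 4 then q + r + 4 else q + 4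
  (x, y)

def move_southeast (shapes : List (List (Int × Int))) : List (List (Int × Int)) :=
  shapes.map (fun shape =>
    shape.map (fun p =>
      let (q, r) := offset_to_axial p.1 p.2
      axial_to_offset q (r + 1)))

-- ===== PORT B =====
def move_southeast_alt (shapes : List (List (Int × Int))) : List (List (Int × Int)) :=
  shapes.map (fun shape =>
    shape.map (fun p => (p.1 + 1, if p.1 ≤ 3 then p.2 + 1 else p.2)))

-- ===== PRECONDITION & SPEC =====
def Spec_move_southeast (shapes : List (List (Int × Int))) (out : List (List (Int × Int))) : Prop := out = move_southeast_alt shapes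
instance (shapes : List (List (Int × Int))) (out : List (List (Int × Int))) : Decidable (Spec_move_southeast shapes out) := by unfold Spec_move_southeast; infer_instance

-- ===== CLAIM (what is proved, stated in full; the proofs are below) =====
def Claim_equal_move_southeast : Prop := ∀ (shapes : List (List (Int × Int))), Dom_move_southeast shapes → Spec_move_southeast shapes (move_southeast shapes)

-- ===== LEMMAS AND PROOFS =====
theorem point_eq (p : Int × Int) :
    axial_to_offset (offset_to_axial p.1 p.2).1 ((offset_to_axial p.1 p.2).2 + 1)
      = (p.1 + 1, if p.1 ≤ 3 then p.2 + 1 else p.2) := by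
  obtain ⟨x, y⟩ := p
  simp only [offset_to_axial, axial_to_offset]
  split_ifs <;> simp_all <;> omega

-- ===== VERDICT (by name: the statement is the Claim_ definition above) =====
theorem move_southeast_spec : Claim_equal_move_southeast := by
  intro shapes _
  unfold Spec_move_southeast move_southeast move_southeast_alt
  simp only [point_eq]
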